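-- pv_equiv track=rewrite | github.com/abrahamathul1111-stack/mie1624-project | overall copied/project/src/io/xlsx_package.py | map_required_sheet_names
-- ===== SOURCE A (Python) =====
-- class WorkbookLoadError(ValueError):
--     """Raised when a workbook cannot be loaded deterministically."""
--
-- def normalize_sheet_name(sheet_name: str) -> str:
--     """Return a compact sheet-name key for strict normalized matching."""
--
--     return "".join(character.lower() for character in sheet_name if character.isalnum())
--
-- def map_required_sheet_names(
--     available_sheet_names: list[str], required_sheet_names: list[str]
-- ) -> dict[str, str]:
--     """Map required sheet names to workbook sheet names without silent guessing."""
--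
--     normalized_lookup: dict[str, list[str]] = {}
--     for sheet_name in available_sheet_names:
--         normalized_lookup.setdefault(normalize_sheet_name(sheet_name), []).append(sheet_name)
--
--     mapping: dict[str, str] = {}
--     for required_sheet_name in required_sheet_names:
--         if required_sheet_name in available_sheet_names:
--             mapping[required_sheet_name] = required_sheet_name
--             continue
--
--         normalized_matches = normalized_lookup.get(
--             normalize_sheet_name(required_sheet_name),
--             [],
--         )
--         if len(normalized_matches) == 1:
--             mapping[required_sheet_name] = normalized_matches[0]
--             continue
--         if len(normalized_matches) > 1:
--             raise WorkbookLoadError(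
--                 "Ambiguous normalized sheet match for "
--                 f"'{required_sheet_name}': {normalized_matches}"
--             )
--
--         raise WorkbookLoadError(
--             f"Required sheet '{required_sheet_name}' was not found. "
--             f"Available sheets: {available_sheet_names}"
--         )
--
--     return mapping
-- ===== SOURCE B (Python) =====
-- class WorkbookLoadError(ValueError):
--     """Raised when a workbook cannot be loaded deterministically."""
--
-- def normalize_sheet_name(sheet_name: str) -> str:
--     return "".join(character.lower() for character in sheet_name if character.isalnum())
--
-- def _resolve_sheet(required_sheet_name, available_sheet_names):
--     if required_sheet_name in available_sheet_names:
--         return required_sheet_name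
--     key = normalize_sheet_name(required_sheet_name)
--     match = None
--     for name in available_sheet_names:
--         if normalize_sheet_name(name) == key:
--             if match is not None:
--                 raise WorkbookLoadError(
--                     "Ambiguous normalized sheet match for "
--                     f"'{required_sheet_name}': "
--                     f"{[n for n in available_sheet_names if normalize_sheet_name(n) == key]}"
--                 )
--             match = name
--     if match is None:
--         raise WorkbookLoadError(
--             f"Required sheet '{required_sheet_name}' was not found. "
--             f"Available sheets: {available_sheet_names}"
--         )
--     return match
--
-- def map_required_sheet_names(available_sheet_names, required_sheet_names):
--     return {
--         name: _resolve_sheet(name, available_sheet_names)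
--         for name in dict.fromkeys(required_sheet_names)
--     }
-- ===== Notes on version B (the rewrite author's own statement) =====
-- stated objective: alternative
-- what changed: Replaced A's prebuilt normalized-lookup dict and insert-into-mapping loop by a dict comprehension over the deduplicated required names, each resolved by a single stateful scan of available_sheet_names that keeps the first normalized match and raises on a second; both error messages are identical.
import Mathlib
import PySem

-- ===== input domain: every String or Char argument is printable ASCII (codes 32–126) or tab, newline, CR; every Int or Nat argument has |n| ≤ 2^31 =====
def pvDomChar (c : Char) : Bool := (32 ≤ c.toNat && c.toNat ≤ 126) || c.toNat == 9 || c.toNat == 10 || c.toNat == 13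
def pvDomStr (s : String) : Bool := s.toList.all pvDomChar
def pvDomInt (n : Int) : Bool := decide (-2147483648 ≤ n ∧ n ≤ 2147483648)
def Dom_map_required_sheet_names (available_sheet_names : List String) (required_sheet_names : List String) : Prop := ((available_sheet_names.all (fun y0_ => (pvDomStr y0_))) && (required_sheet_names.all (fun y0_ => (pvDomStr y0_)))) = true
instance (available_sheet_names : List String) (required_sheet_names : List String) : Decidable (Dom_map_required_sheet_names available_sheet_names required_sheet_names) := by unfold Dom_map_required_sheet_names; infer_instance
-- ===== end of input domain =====

-- ===== PORT A =====
-- B replaces A's prebuilt normalized-lookup dict and mapping-insert loop by a dict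
-- comprehension over the deduplicated required names, each resolved by one stateful scan;
-- Pre_ excludes inputs where A raises WorkbookLoadError (ambiguous or missing sheet).
def normalize_sheet_name (sheet_name : String) : String :=
  String.ofList ((sheet_name.toList.filter (fun c => PySem.Str.isalnum c)).map PySem.Chars.lowerChar)

def map_required_sheet_names (available_sheet_names : List String) (required_sheet_names : List String) : List (String × String) :=
  let normalized_lookup : PySem.Dict String (List String) :=
    available_sheet_names.foldl
      (fun d sheet_name => d.modify (normalize_sheet_name sheet_name) [] (fun l => l ++ [sheet_name]))
      PySem.Dict.empty
  let mapping : PySem.Dict String String :=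
    required_sheet_names.foldl
      (fun m required_sheet_name =>
        if required_sheet_name ∈ available_sheet_names then
          m.insert required_sheet_name required_sheet_name
        else
          let normalized_matches := normalized_lookup.getD (normalize_sheet_name required_sheet_name) []
          if normalized_matches.length = 1 then
            m.insert required_sheet_name (normalized_matches.headD "")
          else
            m)  -- Python raises here (ambiguous / not found); excluded by Pre_
      PySem.Dict.empty
  mapping.items

-- ===== PORT B =====
-- the 'for name in available_sheet_names' scan of _resolve_sheet, with its 'match' state:
-- a second normalized hit means Python raises (ambiguous) → none; acc = the current 'match'
def resolve_scan (key : String) (acc : Option String) : List String → Option String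
  | [] => acc
  | name :: rest =>
    if normalize_sheet_name name == key then
      match acc with
      | some _ => none  -- raise WorkbookLoadError (ambiguous); excluded by Pre_
      | none => resolve_scan key (some name) rest
    else resolve_scan key acc rest

-- _resolve_sheet: none = Python raises WorkbookLoadError (excluded by Pre_)
def resolve_sheet (required_sheet_name : String) (available_sheet_names : List String) : Option String :=
  if required_sheet_name ∈ available_sheet_names then some required_sheet_name
  else resolve_scan (normalize_sheet_name required_sheet_name) none available_sheet_names
  -- the final 'if match is None: raise' is the 'acc = none' result of the scan

def map_required_sheet_names_alt (available_sheet_names : List String) (required_sheet_names : List String) : List (String × String) :=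
  (PySem.List.dedup required_sheet_names).filterMap
    (fun name => (resolve_sheet name available_sheet_names).map (fun v => (name, v)))

-- ===== PRECONDITION & SPEC =====
-- Pre_ excludes exactly the inputs on which A raises WorkbookLoadError: a required
-- name that is neither present verbatim nor has exactly one normalized match.
def Pre_map_required_sheet_names (available_sheet_names : List String) (required_sheet_names : List String) : Prop :=
  ∀ r ∈ required_sheet_names,
    r ∈ available_sheet_names ∨
      (available_sheet_names.filter (fun name => normalize_sheet_name name == normalize_sheet_name r)).length = 1
instance (available_sheet_names : List String) (required_sheet_names : List String) : Decidable (Pre_map_required_sheet_names available_sheet_names required_sheet_names) := by unfold Pre_map_required_sheet_names; infer_instance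

def pvWitness_map_required_sheet_names : List String × List String :=
  (["Data Sheet", "Notes"], ["datasheet", "Notes"])

def Spec_map_required_sheet_names (available_sheet_names : List String) (required_sheet_names : List String) (out : List (String × String)) : Prop := out = map_required_sheet_names_alt available_sheet_names required_sheet_names
instance (available_sheet_names : List String) (required_sheet_names : List String) (out : List (String × String)) : Decidable (Spec_map_required_sheet_names available_sheet_names required_sheet_names out) := by unfold Spec_map_required_sheet_names; infer_instance

-- ===== CLAIM (what is proved, stated in full; the proofs are below) =====
def Claim_equal_map_required_sheet_names : Prop := ∀ (available_sheet_names : List String) (required_sheet_names : List String), Dom_map_required_sheet_names available_sheet_names required_sheet_names → Pre_map_required_sheet_names available_sheet_names required_sheet_names → Spec_map_required_sheet_names available_sheet_names required_sheet_names (map_required_sheet_names available_sheet_names required_sheet_names)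

-- ===== LEMMAS AND PROOFS =====

-- the value A maps a resolvable required name to (exact hit, else the unique normalized match)
def resolvedValue (available : List String) (r : String) : String :=
  if r ∈ available then r
  else (available.filter (fun name => normalize_sheet_name name == normalize_sheet_name r)).headD ""

-- A's grouping fold, looked up at key k, yields the names normalizing to k in source order.
theorem getD_lookup_fold (xs : List String) (d : PySem.Dict String (List String)) (k : String) :
    (xs.foldl (fun d sheet_name => d.modify (normalize_sheet_name sheet_name) [] (fun l => l ++ [sheet_name])) d).getD k []
      = d.getD k [] ++ xs.filter (fun name => normalize_sheet_name name == k) := by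
  induction xs generalizing d with
  | nil => simp
  | cons a xs ih =>
    simp only [List.foldl_cons, List.filter_cons]
    rw [ih]
    by_cases h : normalize_sheet_name a = k
    · subst h
      rw [PySem.Dict.getD_modify_self]
      simp
    · rw [PySem.Dict.getD_modify_of_ne _ _ _ (fun he => h he.symm)]
      simp [h]

-- a fold of inserts whose value depends only on the key: final lookup
theorem getD_foldl_insert_fn (g : String → String) (xs : List String) (d : PySem.Dict String String) (k : String) :
    (xs.foldl (fun m r => m.insert r (g r)) d).getD k ""
      = if k ∈ xs then g k else d.getD k "" := by
  induction xs generalizing d with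
  | nil => simp
  | cons a xs ih =>
    simp only [List.foldl_cons, List.mem_cons]
    rw [ih]
    by_cases hk : k ∈ xs
    · simp [hk]
    · rw [PySem.Dict.getD_insert]
      by_cases he : k = a <;> simp [he, hk]

-- the stateful scan returns: the sole normalized match (acc = none), acc if no match, else none
theorem resolve_scan_eq (key : String) (l : List String) : ∀ acc,
    resolve_scan key acc l =
      match l.filter (fun n => normalize_sheet_name n == key), acc with
      | [], acc => acc
      | [m], none => some m
      | _, _ => none := by
  induction l with
  | nil => intro acc; cases acc <;> rfl
  | cons a l ih =>
    intro acc
    by_cases h : normalize_sheet_name a == key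
    · cases acc with
      | some v => simp [resolve_scan, h]
      | none =>
        simp only [resolve_scan, h, if_true]
        rw [ih]
        simp only [List.filter_cons, h, if_true]
        rcases hf : l.filter (fun n => normalize_sheet_name n == key) with _ | ⟨m, rest⟩ <;> simp
    · simp [resolve_scan, h, ih]

-- under Pre_'s per-name condition, B's resolver returns A's value
theorem resolve_sheet_eq (available : List String) (r : String)
    (h : r ∈ available ∨ (available.filter (fun name => normalize_sheet_name name == normalize_sheet_name r)).length = 1) :
    resolve_sheet r available = some (resolvedValue available r) := by
  unfold resolve_sheet resolvedValue
  by_cases hm : r ∈ available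
  · simp [hm]
  · simp only [hm, if_false]
    rcases h with h | h
    · exact absurd h hm
    · rw [resolve_scan_eq]
      rcases hf : available.filter (fun name => normalize_sheet_name name == normalize_sheet_name r) with _ | ⟨m, rest⟩
      · simp [hf] at h
      · rw [hf] at h
        simp at h
        subst h
        simp

theorem filterMap_eq_map_of_forall_mem {α β : Type} (l : List α) (f : α → Option β) (g : α → β)
    (h : ∀ x ∈ l, f x = some (g x)) : l.filterMap f = l.map g := by
  induction l with
  | nil => rfl
  | cons a l ih =>
    simp only [List.filterMap_cons, h a (by simp), List.map_cons]
    rw [ih (fun x hx => h x (by simp [hx]))]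

-- ===== VERDICT (by name: the statement is the Claim_ definition above) =====
theorem map_required_sheet_names_spec : Claim_equal_map_required_sheet_names := by
  intro available required _ hpre
  unfold Spec_map_required_sheet_names map_required_sheet_names map_required_sheet_names_alt
  dsimp only
  -- A's mapping loop is, on members of required, an insert of the key-determined value
  have hstep :
      required.foldl
        (fun m required_sheet_name =>
          if required_sheet_name ∈ available then
            m.insert required_sheet_name required_sheet_name
          else
            let normalized_matches :=
              (available.foldl
                (fun d sheet_name => d.modify (normalize_sheet_name sheet_name) [] (fun l => l ++ [sheet_name]))
                PySem.Dict.empty).getD (normalize_sheet_name required_sheet_name) []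
            if normalized_matches.length = 1 then
              m.insert required_sheet_name (normalized_matches.headD "")
            else m)
        PySem.Dict.empty
      = required.foldl (fun m r => m.insert r (resolvedValue available r)) PySem.Dict.empty := by
    apply PySem.List.foldl_congr_mem
    intro m r hr
    by_cases hm : r ∈ available
    · simp [resolvedValue, hm]
    · rcases hpre r hr with h | h
      · exact absurd h hm
      · simp only [hm, if_false]
        rw [getD_lookup_fold]
        simp only [PySem.Dict.getD_empty, List.nil_append]
        simp [h, resolvedValue, hm]
  rw [hstep]
  -- A's items: deduped keys paired with their (key-determined) values
  have hnd : (required.foldl (fun m r => m.insert r (resolvedValue available r)) PySem.Dict.empty).keys.Nodup :=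
    PySem.Dict.nodup_keys_foldl_insert required _ PySem.Dict.empty (by simp)
  rw [PySem.Dict.items_eq_map_keys _ hnd ""]
  rw [PySem.Dict.keys_foldl_insert]
  have hkeys : PySem.Set.update (PySem.Dict.empty (κ := String) (ν := String)).keys required
      = PySem.List.dedup required := by
    simp [PySem.Set.update, PySem.List.dedup_eq_ofList, PySem.Set.ofList_eq_foldl]
  rw [hkeys]
  rw [filterMap_eq_map_of_forall_mem _ _ (fun name => (name, resolvedValue available name))
    (fun x hx => by
      rw [resolve_sheet_eq available x (hpre x ((PySem.List.mem_dedup required x).mp hx))]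
      rfl)]
  apply List.map_congr_left
  intro k hk
  rw [getD_foldl_insert_fn]
  simp [(PySem.List.mem_dedup required k).mp hk]
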